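-- pv_equiv track=rewrite | github.com/DTennant/ideation-epiplexity | analysis/wallclock_analysis.py | split_runs_3
-- ===== SOURCE A (Python) =====
-- def split_runs_3(points):
--     """Split list of (step, val_loss, train_time_ms) into individual runs at step 0."""
--     if not points:
--         return []
--     runs = []
--     current = []
--     for pt in points:
--         if pt[0] == 0 and current:
--             runs.append(current)
--             current = []
--         current.append(pt)
--     if current:
--         runs.append(current)
--     return runs
-- ===== SOURCE B (Python) =====
-- def split_runs_3(points):
--     """Split list of (step, val_loss, train_time_ms) into individual runs at step 0."""
--     runs = []
--     n = len(points)
--     i = 0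
--     while i < n:
--         j = i + 1
--         while j < n and points[j][0] != 0:
--             j += 1
--         runs.append(points[i:j])
--         i = j
--     return runs
-- ===== Notes on version B (the rewrite author's own statement) =====
-- stated objective: alternative
-- what changed: Replaces A's accumulating current/flush loop (grow a current run, flush it when a step-0 point arrives) with a two-pointer scan: for each run start i, an inner loop finds the next step-0 boundary j and the run is points[i:j] sliced out directly; i jumps to j.
import Mathlib
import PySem

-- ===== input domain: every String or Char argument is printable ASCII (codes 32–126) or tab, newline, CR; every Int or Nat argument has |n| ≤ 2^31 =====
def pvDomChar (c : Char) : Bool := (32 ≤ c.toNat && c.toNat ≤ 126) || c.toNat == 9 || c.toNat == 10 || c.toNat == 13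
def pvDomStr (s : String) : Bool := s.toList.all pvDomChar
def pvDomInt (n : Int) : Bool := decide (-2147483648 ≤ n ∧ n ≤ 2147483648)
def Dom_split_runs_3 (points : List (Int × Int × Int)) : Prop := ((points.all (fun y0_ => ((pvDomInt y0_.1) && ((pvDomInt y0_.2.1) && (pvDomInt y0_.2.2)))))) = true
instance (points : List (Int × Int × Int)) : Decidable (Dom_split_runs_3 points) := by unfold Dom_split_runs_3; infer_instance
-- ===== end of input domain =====

-- B replaces A's accumulating current/flush loop with a two-pointer scan that finds the end
-- of each run and slices it out directly (objective: alternative decomposition, same O(n) cost).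

-- ===== PORT A =====
-- the for-loop of A over (runs, current)
def pvLoopA : List (Int × Int × Int) → List (List (Int × Int × Int)) → List (Int × Int × Int) → List (List (Int × Int × Int))
  | [], runs, current => if current.isEmpty then runs else runs ++ [current]
  | pt :: rest, runs, current =>
      if pt.1 == 0 && !current.isEmpty then pvLoopA rest (runs ++ [current]) ([] ++ [pt])
      else pvLoopA rest runs (current ++ [pt])

def split_runs_3 (points : List (Int × Int × Int)) : List (List (Int × Int × Int)) :=
  if points.isEmpty then [] else pvLoopA points [] []

-- ===== PORT B =====
-- inner while: advance j while j < n and points[j][0] != 0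
def pvFindJ (points : List (Int × Int × Int)) (n j : Nat) : Nat :=
  if j < n ∧ (points[j]?.any (fun q => q.1 != 0)) = true then pvFindJ points n (j + 1) else j
termination_by n - j
decreasing_by omega

theorem pvFindJ_ge (points : List (Int × Int × Int)) (n j : Nat) : j ≤ pvFindJ points n j := by
  unfold pvFindJ
  split
  · have := pvFindJ_ge points n (j + 1); omega
  · exact le_refl j
termination_by n - j
decreasing_by omega

-- outer while over i, appending points[i:j]
def pvOuter (points : List (Int × Int × Int)) (n i : Nat) (runs : List (List (Int × Int × Int))) : List (List (Int × Int × Int)) :=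
  if i < n then
    pvOuter points n (pvFindJ points n (i + 1))
      (runs ++ [PySem.List.slice points (some (i : Int)) (some ((pvFindJ points n (i + 1) : Nat) : Int))])
  else runs
termination_by n - i
decreasing_by have := pvFindJ_ge points n (i + 1); omega

def split_runs_3_alt (points : List (Int × Int × Int)) : List (List (Int × Int × Int)) :=
  pvOuter points points.length 0 []

-- ===== PRECONDITION & SPEC =====
def Spec_split_runs_3 (points : List (Int × Int × Int)) (out : List (List (Int × Int × Int))) : Prop := out = split_runs_3_alt points
instance (points : List (Int × Int × Int)) (out : List (List (Int × Int × Int))) : Decidable (Spec_split_runs_3 points out) := by unfold Spec_split_runs_3; infer_instance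

-- ===== CLAIM (what is proved, stated in full; the proofs are below) =====
def Claim_equal_split_runs_3 : Prop := ∀ (points : List (Int × Int × Int)), Dom_split_runs_3 points → Spec_split_runs_3 points (split_runs_3 points)

-- ===== LEMMAS AND PROOFS =====

theorem pv_length_takeWhile_le {α : Type} (f : α → Bool) (l : List α) :
    (l.takeWhile f).length ≤ l.length := by
  induction l with
  | nil => simp
  | cons a l ih =>
      rw [List.takeWhile_cons]
      cases h : f a <;> simp <;> omega

-- common recursive characterisation: head plus the maximal nonzero-step span, then recurse
def pvSpec : List (Int × Int × Int) → List (List (Int × Int × Int))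
  | [] => []
  | p :: rest =>
      (p :: rest.takeWhile (fun q => q.1 != 0)) :: pvSpec (rest.dropWhile (fun q => q.1 != 0))
termination_by l => l.length
decreasing_by
  simp only [List.length_cons]
  have h2 : (rest.dropWhile (fun q : Int × Int × Int => q.1 != 0)).length ≤ rest.length :=
    (List.dropWhile_sublist _).length_le
  omega

theorem pvSpec_cons (p : Int × Int × Int) (rest : List (Int × Int × Int)) :
    pvSpec (p :: rest) =
      (p :: rest.takeWhile (fun q => q.1 != 0)) :: pvSpec (rest.dropWhile (fun q => q.1 != 0)) := by
  rw [pvSpec]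

theorem pvLoopA_append (l : List (Int × Int × Int)) (runs : List (List (Int × Int × Int))) (cur : List (Int × Int × Int)) :
    pvLoopA l runs cur = runs ++ pvLoopA l [] cur := by
  induction l generalizing runs cur with
  | nil => simp only [pvLoopA]; split <;> simp
  | cons pt rest ih =>
      simp only [pvLoopA]
      split
      · rw [ih (runs ++ [cur]), ih ([] ++ [cur])]; simp
      · exact ih runs (cur ++ [pt])

theorem pvLoopA_spec (l : List (Int × Int × Int)) (cur : List (Int × Int × Int)) (hc : cur ≠ []) :
    pvLoopA l [] cur = (cur ++ l.takeWhile (fun q => q.1 != 0)) :: pvSpec (l.dropWhile (fun q => q.1 != 0)) := by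
  induction l generalizing cur with
  | nil => simp [pvLoopA, pvSpec, hc]
  | cons pt rest ih =>
      by_cases h0 : pt.1 = 0
      · rw [pvLoopA, if_pos (by simp [h0, hc])]
        simp only [List.nil_append]
        rw [pvLoopA_append, ih [pt] (by simp)]
        rw [List.takeWhile_cons, List.dropWhile_cons,
          if_neg (by simp [h0]), if_neg (by simp [h0]), pvSpec_cons]
        simp
      · rw [pvLoopA, if_neg (by simp [h0])]
        rw [ih (cur ++ [pt]) (by simp), List.takeWhile_cons, List.dropWhile_cons]
        simp only [if_pos (by simp [h0] : ((fun q : Int × Int × Int => q.1 != 0) pt) = true)]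
        simp

theorem split_runs_3_eq_pvSpec (points : List (Int × Int × Int)) : split_runs_3 points = pvSpec points := by
  cases points with
  | nil => simp [split_runs_3, pvSpec]
  | cons p rest =>
      rw [split_runs_3, if_neg (by simp)]
      rw [pvLoopA, if_neg (by simp)]
      simp only [List.nil_append]
      rw [pvLoopA_spec rest [p] (by simp), pvSpec_cons]
      simp

-- take/drop at the takeWhile boundary
theorem take_length_takeWhile {α : Type} (f : α → Bool) (l : List α) :
    l.take (l.takeWhile f).length = l.takeWhile f := by
  induction l with
  | nil => simp
  | cons a l ih =>
      rw [List.takeWhile_cons]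
      cases h : f a <;> simp [ih]

theorem drop_length_takeWhile {α : Type} (f : α → Bool) (l : List α) :
    l.drop (l.takeWhile f).length = l.dropWhile f := by
  induction l with
  | nil => simp
  | cons a l ih =>
      rw [List.takeWhile_cons, List.dropWhile_cons]
      cases h : f a <;> simp [ih]

theorem pvFindJ_eq (points : List (Int × Int × Int)) (j : Nat) (hj : j ≤ points.length) :
    pvFindJ points points.length j = j + ((points.drop j).takeWhile (fun q => q.1 != 0)).length := by
  by_cases hlt : j < points.length
  · have hdrop : points.drop j = points[j] :: points.drop (j + 1) := (List.getElem_cons_drop hlt).symm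
    rw [pvFindJ]
    by_cases hf : points[j].1 = 0
    · rw [if_neg (by simp [List.getElem?_eq_getElem hlt, hf])]
      rw [hdrop, List.takeWhile_cons]
      simp [hf]
    · rw [if_pos ⟨hlt, by simp [List.getElem?_eq_getElem hlt, hf]⟩]
      rw [pvFindJ_eq points (j + 1) hlt, hdrop, List.takeWhile_cons]
      simp only [if_pos (by simp [hf] : ((fun q : Int × Int × Int => q.1 != 0) points[j]) = true)]
      simp; omega
  · have hje : j = points.length := by omega
    rw [pvFindJ, if_neg (fun h => hlt h.1), hje]
    simp
termination_by points.length - j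
decreasing_by omega

theorem pvOuter_spec (points : List (Int × Int × Int)) (i : Nat) (runs : List (List (Int × Int × Int)))
    (hi : i ≤ points.length) :
    pvOuter points points.length i runs = runs ++ pvSpec (points.drop i) := by
  by_cases hlt : i < points.length
  · have hdrop : points.drop i = points[i] :: points.drop (i + 1) := (List.getElem_cons_drop hlt).symm
    have htw : ((points.drop (i + 1)).takeWhile (fun q : Int × Int × Int => q.1 != 0)).length
        ≤ points.length - (i + 1) := by
      have h1 := pv_length_takeWhile_le (fun q : Int × Int × Int => q.1 != 0) (points.drop (i + 1))
      simp at h1; omega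
    have hJ : pvFindJ points points.length (i + 1)
        = i + 1 + ((points.drop (i + 1)).takeWhile (fun q : Int × Int × Int => q.1 != 0)).length :=
      pvFindJ_eq points (i + 1) hlt
    rw [pvOuter, if_pos hlt, hJ]
    rw [pvOuter_spec points _ _ (by omega)]
    have hslice : PySem.List.slice points (some (i : Int))
          (some ((i + 1 + ((points.drop (i + 1)).takeWhile (fun q : Int × Int × Int => q.1 != 0)).length : Nat) : Int))
        = points[i] :: (points.drop (i + 1)).takeWhile (fun q => q.1 != 0) := by
      rw [PySem.List.slice_natCast]
      have he : i + 1 + ((points.drop (i + 1)).takeWhile (fun q : Int × Int × Int => q.1 != 0)).length - i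
          = ((points.drop (i + 1)).takeWhile (fun q : Int × Int × Int => q.1 != 0)).length + 1 := by omega
      rw [he, hdrop, List.take_succ_cons, take_length_takeWhile]
    have hdropJ : points.drop (i + 1 + ((points.drop (i + 1)).takeWhile (fun q : Int × Int × Int => q.1 != 0)).length)
        = (points.drop (i + 1)).dropWhile (fun q => q.1 != 0) := by
      rw [← List.drop_drop, drop_length_takeWhile]
    rw [hslice, hdropJ, hdrop, pvSpec_cons]
    simp
  · rw [pvOuter, if_neg hlt, List.drop_eq_nil_of_le (by omega)]
    simp [pvSpec]
termination_by points.length - i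
decreasing_by have := pvFindJ_ge points points.length (i + 1); omega

theorem split_runs_3_alt_eq_pvSpec (points : List (Int × Int × Int)) : split_runs_3_alt points = pvSpec points := by
  rw [split_runs_3_alt, pvOuter_spec points 0 [] (by omega)]
  simp

-- ===== VERDICT (by name: the statement is the Claim_ definition above) =====
theorem split_runs_3_spec : Claim_equal_split_runs_3 := by
  intro points _
  unfold Spec_split_runs_3
  rw [split_runs_3_eq_pvSpec, split_runs_3_alt_eq_pvSpec]
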